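-- pv_equiv track=rewrite | github.com/Barvizl/ITStep-Python | homework23.py | min_number_from_numbers
-- ===== SOURCE A (Python) =====
-- def min_number_from_numbers(array: list) -> int:
--
--     min_number = array[0]
--     for i in range(1, len(array)):
--         if array[i-1] > array[i]:
--             min_number = array[i]
--         else:
--             continue
--
--     return min_number
-- ===== SOURCE B (Python) =====
-- def min_number_from_numbers(array: list) -> int:
--     for i in range(len(array) - 1, 0, -1):
--         if array[i - 1] > array[i]:
--             return array[i]
--     return array[0]
-- ===== Notes on version B (the rewrite author's own statement) =====
-- stated objective: alternative
-- what changed: B scans backwards from the end and returns immediately at the first descent (which is the array's last descent), instead of A's full forward pass overwriting a running variable; the empty-list IndexError is excluded by Pre_.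
import Mathlib
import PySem

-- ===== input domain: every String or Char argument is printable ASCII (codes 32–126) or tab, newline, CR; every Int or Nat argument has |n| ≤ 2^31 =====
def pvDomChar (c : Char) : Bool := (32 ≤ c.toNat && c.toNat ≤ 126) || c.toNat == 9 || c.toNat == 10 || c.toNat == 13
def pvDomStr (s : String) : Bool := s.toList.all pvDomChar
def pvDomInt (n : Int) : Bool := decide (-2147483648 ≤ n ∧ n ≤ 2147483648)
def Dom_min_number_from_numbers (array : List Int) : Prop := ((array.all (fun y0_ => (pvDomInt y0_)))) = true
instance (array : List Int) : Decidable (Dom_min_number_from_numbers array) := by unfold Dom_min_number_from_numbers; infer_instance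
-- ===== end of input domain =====

-- B scans backwards from the end and returns at the first descent (the array's last descent),
-- instead of A's full forward pass overwriting a running variable.

-- ===== PORT A =====
-- forward loop: min_number = array[0]; for i in range(1,len): if array[i-1] > array[i]: min_number = array[i]
def min_number_from_numbers (array : List Int) : Int :=
  (PySem.List.pyRange 1 (array.length : Int) 1).foldl
    (fun mn i =>
      if PySem.List.pyGetD array (i - 1) 0 > PySem.List.pyGetD array i 0
      then PySem.List.pyGetD array i 0 else mn)
    (PySem.List.pyGetD array 0 0)

-- ===== PORT B =====
-- backward loop with early return: for i in range(len-1, 0, -1): if array[i-1] > array[i]: return array[i]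
def min_number_from_numbers_altLoop (array : List Int) : List Int → Option Int
  | [] => none
  | i :: rest =>
    if PySem.List.pyGetD array (i - 1) 0 > PySem.List.pyGetD array i 0
    then some (PySem.List.pyGetD array i 0)
    else min_number_from_numbers_altLoop array rest

def min_number_from_numbers_alt (array : List Int) : Int :=
  match min_number_from_numbers_altLoop array (PySem.List.pyRange ((array.length : Int) - 1) 0 (-1)) with
  | some v => v
  | none => PySem.List.pyGetD array 0 0

-- ===== PRECONDITION & SPEC =====
-- A raises IndexError on the empty list (array[0]); B does too.
def Pre_min_number_from_numbers (array : List Int) : Prop := array ≠ []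
instance (array : List Int) : Decidable (Pre_min_number_from_numbers array) := by
  unfold Pre_min_number_from_numbers; infer_instance

def pvWitness_min_number_from_numbers : List Int := [3, 1, 2]

def Spec_min_number_from_numbers (array : List Int) (out : Int) : Prop := out = min_number_from_numbers_alt array
instance (array : List Int) (out : Int) : Decidable (Spec_min_number_from_numbers array out) := by unfold Spec_min_number_from_numbers; infer_instance

-- ===== CLAIM (what is proved, stated in full; the proofs are below) =====
def Claim_equal_min_number_from_numbers : Prop := ∀ (array : List Int), Dom_min_number_from_numbers array → Pre_min_number_from_numbers array → Spec_min_number_from_numbers array (min_number_from_numbers array)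

-- ===== LEMMAS AND PROOFS =====

-- A's overwriting forward fold keeps the LAST hit, i.e. the first hit of the reversed index list.
theorem pv_foldl_last_update (c : Int → Prop) [DecidablePred c] (v : Int → Int) (l : List Int) (m : Int) :
    l.foldl (fun mn i => if c i then v i else mn) m
      = ((l.reverse.find? (fun i => decide (c i))).map v).getD m := by
  induction l generalizing m with
  | nil => rfl
  | cons a l ih =>
    rw [List.foldl_cons, ih, List.reverse_cons, List.find?_append]
    cases h : l.reverse.find? (fun i => decide (c i)) with
    | some i => simp
    | none =>
      by_cases hc : c a <;> simp [List.find?, hc]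

-- B's early-return loop is find? composed with the projection.
theorem pv_altLoop_eq_find? (array : List Int) (l : List Int) :
    min_number_from_numbers_altLoop array l
      = (l.find? (fun i => decide (PySem.List.pyGetD array (i - 1) 0 > PySem.List.pyGetD array i 0))).map
          (fun i => PySem.List.pyGetD array i 0) := by
  induction l with
  | nil => rfl
  | cons a l ih =>
    simp only [min_number_from_numbers_altLoop, List.find?]
    by_cases hc : PySem.List.pyGetD array (a - 1) 0 > PySem.List.pyGetD array a 0 <;>
      simp [hc, ih]

-- ===== VERDICT (by name: the statement is the Claim_ definition above) =====
theorem min_number_from_numbers_spec : Claim_equal_min_number_from_numbers := by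
  intro array _ _
  unfold Spec_min_number_from_numbers min_number_from_numbers min_number_from_numbers_alt
  rw [pv_altLoop_eq_find?]
  refine Eq.trans (pv_foldl_last_update
    (c := fun i => PySem.List.pyGetD array (i - 1) 0 > PySem.List.pyGetD array i 0)
    (v := fun i => PySem.List.pyGetD array i 0)
    (PySem.List.pyRange 1 (array.length : Int) 1) (PySem.List.pyGetD array 0 0)) ?_
  rw [show PySem.List.pyRange ((array.length : Int) - 1) 0 (-1)
        = (PySem.List.pyRange 1 (array.length : Int) 1).reverse by
      rw [PySem.List.pyRange_neg_one_eq_reverse]; norm_num]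
  cases h : ((PySem.List.pyRange 1 (array.length : Int) 1).reverse.find?
      (fun i => decide (PySem.List.pyGetD array (i - 1) 0 > PySem.List.pyGetD array i 0))) <;>
    simp
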